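-- pv_equiv track=rewrite | github.com/JorgePdlR/EmotionWave | MIDIoperations.py | _split_with_n_tracks
-- ===== SOURCE A (Python) =====
-- def _split_with_n_tracks(song_in_bars, num_of_bars, num_of_track):
--     divided_song = []
--     # Get the total number of bars in the song
--     total_bars = len(song_in_bars[0])
--     # Counter of number of bars processed
--     current_bars = 0
--     # Get starting bar
--     start = current_bars
--     # Calculate ending bar for next iteration
--     end = current_bars + num_of_bars
--
--     # Divide the track in lists of bars multiple of num_of_bars
--     while start < total_bars:
--         song_fragment = []
--         for track_num in range(num_of_track):
--             track = song_in_bars[track_num]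
--             song_fragment.append(track[start: end])
--
--         # Add total number of bars
--         current_bars += num_of_bars
--         # Get starting bar
--         start = current_bars
--         # Calculate ending bar for next iteration
--         end = current_bars + num_of_bars
--         # Add song_fragment to divided song list
--         divided_song.append(song_fragment)
--
--     return divided_song
-- ===== SOURCE B (Python) =====
-- def _split_with_n_tracks(song_in_bars, num_of_bars, num_of_track):
--     # Materialise the tracks once, then repeatedly peel the first
--     # num_of_bars bars off every track; no index arithmetic.
--     tracks = [song_in_bars[t] for t in range(num_of_track)]
--     rest = len(song_in_bars[0])
--     divided_song = []
--     while rest > 0: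
--         divided_song.append([tr[:num_of_bars] for tr in tracks])
--         tracks = [tr[num_of_bars:] for tr in tracks]
--         rest -= num_of_bars
--     return divided_song
-- ===== Notes on version B (the rewrite author's own statement) =====
-- stated objective: alternative
-- what changed: Replaces A's start/end index arithmetic (counters advanced by num_of_bars, each track sliced at computed offsets) by materialising the track list once and repeatedly peeling the first num_of_bars bars off every track (fragment = tr[:num_of_bars], remainder = tr[num_of_bars:]) with a simple bar countdown.
-- outside the precondition, e.g. on _split_with_n_tracks([[], [[5]]], 1, 3): A returns [], B raises IndexError
import Mathlib
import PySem

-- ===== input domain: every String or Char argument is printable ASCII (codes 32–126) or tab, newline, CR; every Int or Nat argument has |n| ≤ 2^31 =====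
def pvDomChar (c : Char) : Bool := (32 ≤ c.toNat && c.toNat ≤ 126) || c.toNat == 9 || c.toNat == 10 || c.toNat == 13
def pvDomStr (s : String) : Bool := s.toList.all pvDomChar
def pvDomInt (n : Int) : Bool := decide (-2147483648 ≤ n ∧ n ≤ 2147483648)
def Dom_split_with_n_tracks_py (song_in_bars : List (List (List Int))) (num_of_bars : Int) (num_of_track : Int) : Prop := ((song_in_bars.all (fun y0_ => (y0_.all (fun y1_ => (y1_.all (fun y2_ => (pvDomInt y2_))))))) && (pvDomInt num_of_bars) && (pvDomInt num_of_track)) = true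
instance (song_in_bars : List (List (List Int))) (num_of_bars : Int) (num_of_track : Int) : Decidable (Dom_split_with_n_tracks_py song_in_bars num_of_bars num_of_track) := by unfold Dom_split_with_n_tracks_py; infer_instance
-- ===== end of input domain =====

-- B replaces A's start/end index arithmetic by peeling num_of_bars bars off each track per step; objective: alternative.

-- ===== PORT A =====
-- one iteration's song_fragment: [song_in_bars[t][start:end] for t in range(num_of_track)]
def aFragment (song_in_bars : List (List (List Int))) (num_of_bars : Int) (num_of_track : Int) (start : Int) : List (List (List Int)) :=
  (PySem.List.pyRange 0 num_of_track 1).map (fun t =>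
    PySem.List.slice (PySem.List.pyGetD song_in_bars t []) (some start) (some (start + num_of_bars)))

-- the while-loop; fuel bounds the iterations (enough whenever the Python terminates)
def aLoop (song_in_bars : List (List (List Int))) (num_of_bars : Int) (num_of_track : Int) (total_bars : Int) : Nat → Int → List (List (List (List Int)))
  | 0, _ => []
  | fuel + 1, current_bars =>
    if current_bars < total_bars then
      aFragment song_in_bars num_of_bars num_of_track current_bars ::
        aLoop song_in_bars num_of_bars num_of_track total_bars fuel (current_bars + num_of_bars)
    else []

def split_with_n_tracks_py (song_in_bars : List (List (List Int))) (num_of_bars : Int) (num_of_track : Int) : List (List (List (List Int))) :=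
  let total_bars : Int := ((PySem.List.pyGetD song_in_bars 0 []).length : Int)
  aLoop song_in_bars num_of_bars num_of_track total_bars (total_bars.toNat + 1) 0

-- ===== PORT B =====
-- B's while-loop: emit [tr[:nb] for tr in tracks], continue with [tr[nb:] for tr in tracks];
-- fuel bounds the iterations (enough whenever the Python terminates)
def bPeel (num_of_bars : Int) : Nat → List (List (List Int)) → Int → List (List (List (List Int)))
  | 0, _, _ => []
  | fuel + 1, tracks, rest =>
    if 0 < rest then
      tracks.map (fun tr => PySem.List.slice tr none (some num_of_bars)) ::
        bPeel num_of_bars fuel (tracks.map (fun tr => PySem.List.slice tr (some num_of_bars) none)) (rest - num_of_bars)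
    else []

def split_with_n_tracks_py_alt (song_in_bars : List (List (List Int))) (num_of_bars : Int) (num_of_track : Int) : List (List (List (List Int))) :=
  let tracks : List (List (List Int)) := (PySem.List.pyRange 0 num_of_track 1).map (fun t => PySem.List.pyGetD song_in_bars t [])
  let rest : Int := ((PySem.List.pyGetD song_in_bars 0 []).length : Int)
  bPeel num_of_bars (rest.toNat + 1) tracks rest

-- ===== PRECONDITION & SPEC =====
-- Pre_ excludes: empty songs (A raises IndexError); num_of_bars ≤ 0 with bars present (A loops forever); and
-- num_of_track > len(song_in_bars) — there A raises IndexError whenever bars are present, and when there are none it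
-- returns [] only because its loop never runs, an accident of A's implementation (B raises IndexError there).
def Pre_split_with_n_tracks_py (song_in_bars : List (List (List Int))) (num_of_bars : Int) (num_of_track : Int) : Prop :=
  song_in_bars ≠ [] ∧ num_of_track ≤ (song_in_bars.length : Int) ∧
    (0 < num_of_bars ∨ (song_in_bars.headD []).length = 0)
instance (song_in_bars : List (List (List Int))) (num_of_bars : Int) (num_of_track : Int) : Decidable (Pre_split_with_n_tracks_py song_in_bars num_of_bars num_of_track) := by unfold Pre_split_with_n_tracks_py; infer_instance

def pvWitness_split_with_n_tracks_py : List (List (List Int)) × Int × Int := ([[[1], [2], [3]]], 2, 1)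

def Spec_split_with_n_tracks_py (song_in_bars : List (List (List Int))) (num_of_bars : Int) (num_of_track : Int) (out : List (List (List (List Int)))) : Prop := out = split_with_n_tracks_py_alt song_in_bars num_of_bars num_of_track
instance (song_in_bars : List (List (List Int))) (num_of_bars : Int) (num_of_track : Int) (out : List (List (List (List Int)))) : Decidable (Spec_split_with_n_tracks_py song_in_bars num_of_bars num_of_track out) := by unfold Spec_split_with_n_tracks_py; infer_instance

-- ===== CLAIM (what is proved, stated in full; the proofs are below) =====
def Claim_equal_split_with_n_tracks_py : Prop := ∀ (song_in_bars : List (List (List Int))) (num_of_bars : Int) (num_of_track : Int), Dom_split_with_n_tracks_py song_in_bars num_of_bars num_of_track → Pre_split_with_n_tracks_py song_in_bars num_of_bars num_of_track → Spec_split_with_n_tracks_py song_in_bars num_of_bars num_of_track (split_with_n_tracks_py song_in_bars num_of_bars num_of_track)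

-- ===== LEMMAS AND PROOFS =====

lemma pyRange_pos_nil (a b s : Int) (hs : 0 < s) (hab : b ≤ a) :
    PySem.List.pyRange a b s = [] := by
  rw [PySem.List.pyRange_of_pos _ _ hs, if_neg (by omega)]
  simp

lemma pyRange_pos_cons (a b s : Int) (hs : 0 < s) (hab : a < b) :
    PySem.List.pyRange a b s = a :: PySem.List.pyRange (a + s) b s := by
  rw [PySem.List.pyRange_of_pos _ _ hs, PySem.List.pyRange_of_pos _ _ hs]
  have hcnt : ((b - a + s - 1) / s).toNat
      = (if a + s < b then ((b - (a + s) + s - 1) / s).toNat else 0) + 1 := by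
    split_ifs with h
    · have he : b - a + s - 1 = (b - (a + s) + s - 1) + 1 * s := by ring
      rw [he, Int.add_mul_ediv_right _ _ (by omega : s ≠ 0)]
      have h1 : 0 ≤ (b - (a + s) + s - 1) / s := Int.ediv_nonneg (by omega) (by omega)
      omega
    · have he : b - a + s - 1 = (b - a - 1) + 1 * s := by ring
      rw [he, Int.add_mul_ediv_right _ _ (by omega : s ≠ 0)]
      have h0 : (b - a - 1) / s = 0 := Int.ediv_eq_zero_of_lt (by omega) (by omega)
      omega
  rw [if_pos hab, hcnt, List.range_succ_eq_map]
  simp [List.map_map, Function.comp]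
  intro k _; ring

-- shifting a positive-step range by its step
lemma pyRange_pos_shift (b s : Int) (hs : 0 < s) :
    PySem.List.pyRange s b s = (PySem.List.pyRange 0 (b - s) s).map (· + s) := by
  rw [PySem.List.pyRange_of_pos _ _ hs, PySem.List.pyRange_of_pos _ _ hs]
  have hcnt : (if s < b then ((b - s + s - 1) / s).toNat else 0)
      = (if 0 < b - s then ((b - s - 0 + s - 1) / s).toNat else 0) := by
    by_cases h1 : s < b
    · rw [if_pos h1, if_pos (by omega)]; ring_nf
    · rw [if_neg h1, if_neg (by omega)]
  rw [hcnt, List.map_map]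
  apply List.map_congr_left
  intro k _
  simp [Function.comp]
  ring

-- A's loop computes the map of aFragment over range(cb, total, nb), given enough fuel
lemma aLoop_eq (song : List (List (List Int))) (nb nt total : Int) (hnb : 0 < nb) :
    ∀ (fuel : Nat) (cb : Int), total ≤ cb + (fuel : Int) * nb →
      aLoop song nb nt total fuel cb
        = (PySem.List.pyRange cb total nb).map (aFragment song nb nt) := by
  intro fuel
  induction fuel with
  | zero =>
    intro cb h
    rw [aLoop, pyRange_pos_nil _ _ _ hnb (by simpa using h)]
    simp
  | succ f ih =>
    intro cb h
    rw [aLoop]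
    by_cases hc : cb < total
    · rw [if_pos hc, pyRange_pos_cons _ _ _ hnb hc, List.map_cons]
      congr 1
      apply ih
      have hcast : ((f + 1 : Nat) : Int) * nb = (f : Int) * nb + nb := by push_cast; ring
      linarith [hcast ▸ h]
    · rw [if_neg hc, pyRange_pos_nil _ _ _ hnb (by omega)]
      simp

-- a slice of a peeled track is the corresponding offset slice of the original track
lemma slice_peel (tr : List (List Int)) (nb s : Int) (hnb : 0 < nb) (hs : 0 ≤ s) :
    PySem.List.slice (PySem.List.slice tr (some nb) none) (some s) (some (s + nb))
      = PySem.List.slice tr (some (s + nb)) (some (s + nb + nb)) := by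
  rw [show PySem.List.slice tr (some nb) none = tr.drop nb.toNat from PySem.List.slice_from tr (by omega),
      PySem.List.slice_toNat _ (by omega : (0:Int) ≤ s) (by omega : (0:Int) ≤ s + nb),
      PySem.List.slice_toNat _ (by omega : (0:Int) ≤ s + nb) (by omega : (0:Int) ≤ s + nb + nb)]
  rw [List.drop_drop]
  congr 1
  · omega
  · congr 1
    omega

-- B's peeling loop computes the same chunk list, given enough fuel
lemma bPeel_eq (nb : Int) (hnb : 0 < nb) :
    ∀ (fuel : Nat) (tracks : List (List (List Int))) (rest : Int), rest ≤ (fuel : Int) * nb →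
      bPeel nb fuel tracks rest
        = (PySem.List.pyRange 0 rest nb).map (fun s =>
            tracks.map (fun tr => PySem.List.slice tr (some s) (some (s + nb)))) := by
  intro fuel
  induction fuel with
  | zero =>
    intro tracks rest h
    rw [bPeel, pyRange_pos_nil _ _ _ hnb (by simpa using h)]
    simp
  | succ f ih =>
    intro tracks rest h
    rw [bPeel]
    by_cases hc : 0 < rest
    · rw [if_pos hc, pyRange_pos_cons _ _ _ hnb hc, List.map_cons]
      have hhead : tracks.map (fun tr => PySem.List.slice tr none (some nb))
          = tracks.map (fun tr => PySem.List.slice tr (some 0) (some (0 + nb))) := by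
        apply List.map_congr_left
        intro tr _
        rw [PySem.List.slice_zero_start]
        norm_num
      rw [hhead]
      congr 1
      rw [ih _ _ (by
        have hcast : ((f + 1 : Nat) : Int) * nb = (f : Int) * nb + nb := by push_cast; ring
        linarith [hcast ▸ h])]
      rw [zero_add, pyRange_pos_shift rest nb hnb, List.map_map]
      apply List.map_congr_left
      intro s hs
      have hs0 : 0 ≤ s := ((PySem.List.mem_pyRange_iff_of_pos hnb s).mp hs).1
      simp only [Function.comp, List.map_map]
      apply List.map_congr_left
      intro tr _
      have := slice_peel tr nb s hnb hs0
      simpa [add_comm, add_assoc, add_left_comm] using this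
    · rw [if_neg hc, pyRange_pos_nil _ _ _ hnb (by omega)]
      simp

-- ===== VERDICT (by name: the statement is the Claim_ definition above) =====
theorem split_with_n_tracks_py_spec : Claim_equal_split_with_n_tracks_py := by
  intro song nb nt _hdom hpre
  obtain ⟨hsong, -, hcases⟩ := hpre
  unfold Spec_split_with_n_tracks_py split_with_n_tracks_py split_with_n_tracks_py_alt
  dsimp only
  rcases hcases with hnb | h0
  · -- positive chunk size: both loops produce the chunk list over range(0, total, nb)
    set total : Int := ((PySem.List.pyGetD song 0 []).length : Int) with htotal
    have hfuel : total ≤ ((total.toNat + 1 : Nat) : Int) * nb := by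
      have h2 : ((total.toNat + 1 : Nat) : Int) ≤ ((total.toNat + 1 : Nat) : Int) * nb := by
        nlinarith [Int.natCast_nonneg (total.toNat + 1)]
      omega
    rw [aLoop_eq song nb nt total hnb (total.toNat + 1) 0 (by simpa using hfuel),
        bPeel_eq nb hnb (total.toNat + 1) _ total hfuel]
    apply List.map_congr_left
    intro s _
    unfold aFragment
    rw [List.map_map]
    rfl
  · -- no bars at all (num_of_bars arbitrary): both loops exit immediately
    have hhead : PySem.List.pyGetD song 0 [] = song.headD [] := by
      cases song with
      | nil => exact absurd rfl hsong
      | cons h t => simp [PySem.List.pyGetD, PySem.List.pyGet?, PySem.List.pyIdx?]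
    rw [hhead, h0]
    simp [aLoop, bPeel]
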